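-- pv_equiv track=rewrite | github.com/kevins981/AgentOccam | AgentOccam/AgentOccam.py | merge_adjacent_text
-- ===== SOURCE A (Python) =====
-- def merge_adjacent_text(message_list):
--     merged_list = []
--     current_tuple = None
--
--     for tup in message_list:
--         if tup[0] == "text":
--             if current_tuple:
--                 current_tuple = (current_tuple[0], current_tuple[1] + tup[1])
--             else:
--                 current_tuple = tup
--         else:
--             if current_tuple:
--                 merged_list.append(current_tuple)
--                 current_tuple = None
--             merged_list.append(tup)
--
--     if current_tuple:
--         merged_list.append(current_tuple)
--
--     return merged_list
-- ===== SOURCE B (Python) =====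
-- def merge_adjacent_text(message_list):
--     out = []
--     rest = list(message_list)
--     while rest:
--         head = rest[0]
--         rest = rest[1:]
--         if head[0] == "text":
--             merged = head
--             while rest and rest[0][0] == "text":
--                 merged = (merged[0], merged[1] + rest[0][1])
--                 rest = rest[1:]
--             out.append(merged)
--         else:
--             out.append(head)
--     return out
-- ===== Notes on version B (the rewrite author's own statement) =====
-- stated objective: alternative
-- what changed: Replaces A's single-pass state machine with a pending current_tuple and trailing flush by a run-splitting scan: each text run is consumed inner-loop and folded into one tuple on the spot, non-text items are copied directly, so there is no carried Optional state and no final flush.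
import Mathlib
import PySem

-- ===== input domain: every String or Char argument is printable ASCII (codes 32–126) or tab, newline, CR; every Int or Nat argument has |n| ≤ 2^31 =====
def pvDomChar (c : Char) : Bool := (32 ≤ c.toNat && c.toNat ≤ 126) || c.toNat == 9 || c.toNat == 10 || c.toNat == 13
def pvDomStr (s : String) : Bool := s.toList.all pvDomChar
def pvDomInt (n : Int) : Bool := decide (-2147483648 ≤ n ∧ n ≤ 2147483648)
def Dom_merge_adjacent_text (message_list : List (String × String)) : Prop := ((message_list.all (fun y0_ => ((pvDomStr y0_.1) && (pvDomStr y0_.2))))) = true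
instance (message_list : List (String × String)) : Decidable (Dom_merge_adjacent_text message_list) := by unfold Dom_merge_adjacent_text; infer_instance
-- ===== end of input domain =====

-- B replaces A's state machine (pending current_tuple + trailing flush) by a run-splitting
-- scan that folds each consecutive "text" run into one tuple on the spot (alternative decomposition).

-- ===== PORT A =====
-- A folds over the list carrying (merged_list, current_tuple); a 2-tuple is always truthy
-- in Python, so `if current_tuple:` is exactly the `some` test.
def merge_adjacent_text (message_list : List (String × String)) : List (String × String) :=
  match message_list.foldl
    (fun (st : List (String × String) × Option (String × String)) tup =>
      if tup.1 == "text" then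
        match st.2 with
        | some c => (st.1, some (c.1, c.2 ++ tup.2))
        | none => (st.1, some tup)
      else
        match st.2 with
        | some c => (st.1 ++ [c, tup], none)
        | none => (st.1 ++ [tup], none))
    ([], none) with
  | (acc, some c) => acc ++ [c]
  | (acc, none) => acc

-- ===== PORT B =====
-- inner while-loop of Source B: fold the rest of a text run into `merged`, return (merged, rest)
def mergeRun : (String × String) → List (String × String) → (String × String) × List (String × String)
  | merged, [] => (merged, [])
  | merged, t :: rest =>
    if t.1 == "text" then mergeRun (merged.1, merged.2 ++ t.2) rest
    else (merged, t :: rest)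

theorem mergeRun_len (c : String × String) (l : List (String × String)) :
    (mergeRun c l).2.length ≤ l.length := by
  induction l generalizing c with
  | nil => simp [mergeRun]
  | cons t rest ih =>
    simp only [mergeRun]
    split
    · exact Nat.le_succ_of_le (ih _)
    · simp

-- outer while-loop of Source B
def merge_adjacent_text_alt : List (String × String) → List (String × String)
  | [] => []
  | head :: rest =>
    if head.1 == "text" then
      let r := mergeRun head rest
      r.1 :: merge_adjacent_text_alt r.2
    else
      head :: merge_adjacent_text_alt rest
termination_by l => l.length
decreasing_by
  · exact Nat.lt_succ_of_le (mergeRun_len head rest)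
  · simp

-- ===== PRECONDITION & SPEC =====
def Spec_merge_adjacent_text (message_list : List (String × String)) (out : List (String × String)) : Prop := out = merge_adjacent_text_alt message_list
instance (message_list : List (String × String)) (out : List (String × String)) : Decidable (Spec_merge_adjacent_text message_list out) := by unfold Spec_merge_adjacent_text; infer_instance

-- ===== CLAIM (what is proved, stated in full; the proofs are below) =====
def Claim_equal_merge_adjacent_text : Prop := ∀ (message_list : List (String × String)), Dom_merge_adjacent_text message_list → Spec_merge_adjacent_text message_list (merge_adjacent_text message_list)

-- ===== LEMMAS AND PROOFS =====

-- A's loop body, named for the proofs (definitionally the lambda in merge_adjacent_text)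
def stepA (st : List (String × String) × Option (String × String)) (tup : String × String) :
    List (String × String) × Option (String × String) :=
  if tup.1 == "text" then
    match st.2 with
    | some c => (st.1, some (c.1, c.2 ++ tup.2))
    | none => (st.1, some tup)
  else
    match st.2 with
    | some c => (st.1 ++ [c, tup], none)
    | none => (st.1 ++ [tup], none)

-- the rest of A's computation after the fold, as a recursion on (pending, remaining input)
def procA : Option (String × String) → List (String × String) → List (String × String)
  | none, [] => []
  | some c, [] => [c]
  | ct, t :: l =>
    if t.1 == "text" then
      match ct with
      | some c => procA (some (c.1, c.2 ++ t.2)) l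
      | none => procA (some t) l
    else
      match ct with
      | some c => c :: t :: procA none l
      | none => t :: procA none l

theorem foldlA_eq_procA (l : List (String × String))
    (ml : List (String × String)) (ct : Option (String × String)) :
    (match l.foldl stepA (ml, ct) with
     | (acc, some c) => acc ++ [c]
     | (acc, none) => acc) = ml ++ procA ct l := by
  induction l generalizing ml ct with
  | nil => cases ct <;> simp [procA]
  | cons t l ih =>
    simp only [List.foldl_cons]
    by_cases ht : t.1 == "text"
    · cases ct with
      | none =>
        rw [show stepA (ml, none) t = (ml, some t) by simp [stepA, ht]]
        simp [procA, ht, ih]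
      | some c =>
        rw [show stepA (ml, some c) t = (ml, some (c.1, c.2 ++ t.2)) by simp [stepA, ht]]
        simp [procA, ht, ih]
    · cases ct with
      | none =>
        rw [show stepA (ml, none) t = (ml ++ [t], none) by simp [stepA, ht]]
        simp [procA, ht, ih]
      | some c =>
        rw [show stepA (ml, some c) t = (ml ++ [c, t], none) by simp [stepA, ht]]
        simp [procA, ht, ih]

theorem procA_eq_alt (l : List (String × String)) :
    procA none l = merge_adjacent_text_alt l ∧
    ∀ c, procA (some c) l = (mergeRun c l).1 :: merge_adjacent_text_alt (mergeRun c l).2 := by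
  induction l with
  | nil => simp [procA, mergeRun, merge_adjacent_text_alt]
  | cons t l ih =>
    constructor
    · by_cases ht : t.1 == "text"
      · simp [procA, ht, merge_adjacent_text_alt, ih.2 t]
      · simp [procA, ht, merge_adjacent_text_alt, ih.1]
    · intro c
      by_cases ht : t.1 == "text"
      · simp [procA, ht, mergeRun, ih.2]
      · simp [procA, ht, mergeRun, merge_adjacent_text_alt, ih.1]

-- ===== VERDICT (by name: the statement is the Claim_ definition above) =====
theorem merge_adjacent_text_spec : Claim_equal_merge_adjacent_text := by
  intro l _
  unfold Spec_merge_adjacent_text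
  show (match l.foldl stepA ([], none) with
        | (acc, some c) => acc ++ [c]
        | (acc, none) => acc) = merge_adjacent_text_alt l
  have h := foldlA_eq_procA l [] none
  simp only [List.nil_append] at h
  exact h.trans (procA_eq_alt l).1
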